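-- pv_equiv track=rewrite | github.com/adotdong29/CoordPy | coordpy/corruption_robust_carrier_v3.py | bch_15_7_encode
-- ===== SOURCE A (Python) =====
-- from typing import Any, Sequence
--
-- W55_BCH_15_7_DATA_BITS: int = 7
--
-- W55_BCH_15_7_PARITY_BITS: int = 8
--
-- _BCH_15_7_GEN_POLY: tuple[int, ...] = (
--     1, 1, 1, 0, 1, 0, 0, 0, 1)
--
-- def _poly_mod(
--         dividend: Sequence[int],
--         divisor: Sequence[int]) -> list[int]:
--     """Compute polynomial division remainder over GF(2)."""
--     rem = [int(b) & 1 for b in dividend]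
--     d_len = len(divisor)
--     for i in range(len(rem) - d_len + 1):
--         if rem[i]:
--             for j in range(d_len):
--                 rem[i + j] ^= int(divisor[j])
--     return rem[-(d_len - 1):]
--
-- def bch_15_7_encode(data7: Sequence[int]) -> tuple[int, ...]:
--     """Encode 7 data bits as a 15-bit BCH(15,7) systematic codeword.
--
--     Codeword = data || parity, where parity = (data << 8) mod g(x).
--     """
--     d = [int(b) & 1 for b in data7]
--     while len(d) < W55_BCH_15_7_DATA_BITS:
--         d.append(0)
--     d = d[:W55_BCH_15_7_DATA_BITS]
--     shifted = list(d) + [0] * W55_BCH_15_7_PARITY_BITS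
--     parity = _poly_mod(shifted, _BCH_15_7_GEN_POLY)
--     return tuple(d + parity)
-- ===== SOURCE B (Python) =====
-- _BCH_15_7_GEN_LOW: tuple[int, ...] = (1, 1, 0, 1, 0, 0, 0, 1)
--
-- def bch_15_7_encode(data7):
--     """Encode 7 data bits as a 15-bit BCH(15,7) systematic codeword via an LFSR."""
--     bits = [int(b) & 1 for b in data7][:7]
--     bits += [0] * (7 - len(bits))
--     reg = [0] * 8
--     for bit in bits:
--         fb = bit ^ reg[0]
--         reg = reg[1:] + [0]
--         if fb:
--             reg = [r ^ g for r, g in zip(reg, _BCH_15_7_GEN_LOW)]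
--     return tuple(bits + reg)
-- ===== Notes on version B (the rewrite author's own statement) =====
-- stated objective: alternative
-- what changed: Replaces the 15-slot shifted-message array and GF(2) polynomial long division (nested index loops with in-place XOR) by an 8-bit LFSR parity register streamed once over the 7 data bits.
import Mathlib
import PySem

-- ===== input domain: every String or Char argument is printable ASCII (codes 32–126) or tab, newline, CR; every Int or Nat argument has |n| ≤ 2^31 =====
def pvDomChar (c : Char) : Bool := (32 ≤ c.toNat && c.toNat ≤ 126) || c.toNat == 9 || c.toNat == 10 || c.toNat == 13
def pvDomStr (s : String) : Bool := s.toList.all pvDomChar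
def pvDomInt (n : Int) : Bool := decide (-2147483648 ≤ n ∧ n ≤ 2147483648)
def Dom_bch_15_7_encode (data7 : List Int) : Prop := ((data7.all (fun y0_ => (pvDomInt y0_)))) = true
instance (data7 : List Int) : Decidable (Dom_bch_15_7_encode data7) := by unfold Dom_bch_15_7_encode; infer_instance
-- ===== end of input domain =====

-- B replaces A's 15-slot polynomial long division by an 8-bit LFSR register streamed
-- over the 7 data bits (objective: alternative algorithm, same cost).

-- ===== PORT A =====
-- _BCH_15_7_GEN_POLY
def pvBchGen : List Int := [1, 1, 1, 0, 1, 0, 0, 0, 1]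

-- _poly_mod: rem mutated in place → fold over the index range carrying rem
def pvPolyMod (dividend divisor : List Int) : List Int :=
  let rem0 := dividend.map (fun b => PySem.Int.band b 1)
  let dLen : Int := divisor.length
  let rem := (PySem.List.pyRange 0 ((rem0.length : Int) - dLen + 1) 1).foldl
    (fun rem i =>
      if PySem.List.pyGetD rem i 0 ≠ 0 then
        (PySem.List.pyRange 0 dLen 1).foldl
          (fun rem j =>
            PySem.List.pySetD rem (i + j)
              (PySem.Int.bxor (PySem.List.pyGetD rem (i + j) 0)
                (PySem.List.pyGetD divisor j 0)))
          rem
      else rem)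
    rem0
  PySem.List.slice rem (some (-(dLen - 1))) none   -- rem[-(d_len-1):]

-- 'while len(d) < 7: d.append(0)'  (runs at most 7 times; fuel 7 is exact)
def pvPad7Aux : Nat → List Int → List Int
  | 0, d => d
  | k + 1, d => if d.length < 7 then pvPad7Aux k (d ++ [0]) else d

def pvPad7 (d : List Int) : List Int := pvPad7Aux 7 d

def bch_15_7_encode (data7 : List Int) : List Int :=
  let d0 := data7.map (fun b => PySem.Int.band b 1)
  let d1 := pvPad7 d0
  let d := PySem.List.slice d1 none (some 7)     -- d[:7]
  let shifted := d ++ List.replicate 8 0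
  let parity := pvPolyMod shifted pvBchGen
  d ++ parity

-- ===== PORT B =====
-- _BCH_15_7_GEN_LOW
def pvBchGenLow : List Int := [1, 1, 0, 1, 0, 0, 0, 1]

def bch_15_7_encode_alt (data7 : List Int) : List Int :=
  let bits0 := PySem.List.slice (data7.map (fun b => PySem.Int.band b 1)) none (some 7)
  let bits := bits0 ++ List.replicate (7 - bits0.length) 0
  let reg := bits.foldl
    (fun reg bit =>
      let fb := PySem.Int.bxor bit (PySem.List.pyGetD reg 0 0)
      let reg' := PySem.List.slice reg (some 1) none ++ [0]   -- reg[1:] + [0]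
      if fb ≠ 0 then (reg'.zip pvBchGenLow).map (fun p => PySem.Int.bxor p.1 p.2)
      else reg')
    (List.replicate 8 0)
  bits ++ reg

-- ===== PRECONDITION & SPEC =====
def Spec_bch_15_7_encode (data7 : List Int) (out : List Int) : Prop := out = bch_15_7_encode_alt data7
instance (data7 : List Int) (out : List Int) : Decidable (Spec_bch_15_7_encode data7 out) := by unfold Spec_bch_15_7_encode; infer_instance

-- ===== CLAIM (what is proved, stated in full; the proofs are below) =====
def Claim_equal_bch_15_7_encode : Prop := ∀ (data7 : List Int), Dom_bch_15_7_encode data7 → Spec_bch_15_7_encode data7 (bch_15_7_encode data7)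

-- ===== LEMMAS AND PROOFS =====

-- the common preprocessed bit list: first 7 bits, zero-padded
def pvBits (l : List Int) : List Int :=
  l.take 7 ++ List.replicate (7 - (l.take 7).length) 0

lemma pvPad7Aux_eq (k : Nat) (d : List Int) (hk : 7 - d.length ≤ k) :
    pvPad7Aux k d = d ++ List.replicate (7 - d.length) 0 := by
  induction k generalizing d with
  | zero =>
    have : 7 - d.length = 0 := by omega
    simp [pvPad7Aux, this]
  | succ k ih =>
    by_cases h : d.length < 7
    · have h1 : 7 - (d ++ [0]).length ≤ k := by simp; omega
      have h2 : 7 - d.length = (7 - (d ++ [0]).length) + 1 := by simp; omega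
      simp only [pvPad7Aux, if_pos h, ih _ h1, h2, List.replicate_succ,
        List.append_assoc, List.singleton_append]
    · have : 7 - d.length = 0 := by omega
      simp [pvPad7Aux, h, this]

lemma pvPad7_eq (d : List Int) : pvPad7 d = d ++ List.replicate (7 - d.length) 0 :=
  pvPad7Aux_eq 7 d (by omega)

lemma mem_band_one {l : List Int} {x : Int}
    (hx : x ∈ l.map (fun b => PySem.Int.band b 1)) : x = 0 ∨ x = 1 := by
  rcases List.mem_map.mp hx with ⟨b, _, rfl⟩
  rw [PySem.Int.band_one]
  have h1 := PySem.Int.mod_nonneg b (b := 2) (by omega)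
  have h2 := PySem.Int.mod_lt b (b := 2) (by omega)
  omega

lemma mem_pvBits_bit {l : List Int} {x : Int}
    (hx : x ∈ pvBits (l.map (fun b => PySem.Int.band b 1))) : x = 0 ∨ x = 1 := by
  rcases List.mem_append.mp hx with h | h
  · exact mem_band_one (List.mem_of_mem_take h)
  · exact Or.inl (List.eq_of_mem_replicate h)

lemma pvBits_length (l : List Int) : (pvBits l).length = 7 := by
  simp [pvBits]

lemma map_band_one_id {d : List Int} (hb : ∀ x ∈ d, x = 0 ∨ x = 1) :
    d.map (fun b => PySem.Int.band b 1) = d := by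
  conv_rhs => rw [← List.map_id d]
  refine List.map_congr_left (fun x hx => ?_)
  rcases hb x hx with rfl | rfl <;> decide

lemma slice_to_seven (l : List Int) :
    PySem.List.slice l none (some 7) = l.take 7 := by
  rw [PySem.List.slice_to (b := 7) l (by omega)]
  simp

lemma takePad_eq_pvBits (l : List Int) :
    PySem.List.slice (pvPad7 l) none (some 7) = pvBits l := by
  rw [slice_to_seven, pvPad7_eq, pvBits, List.take_append, List.take_replicate,
    List.length_take]
  congr 2
  omega

lemma preproc_id {d : List Int} (h7 : d.length = 7) (hb : ∀ x ∈ d, x = 0 ∨ x = 1) :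
    PySem.List.slice (pvPad7 (d.map (fun b => PySem.Int.band b 1))) none (some 7) = d := by
  rw [map_band_one_id hb, pvPad7_eq, h7]
  simp [slice_to_seven, List.take_of_length_le (by omega : d.length ≤ 7)]

set_option maxRecDepth 32768 in
lemma key (d : List Int) (h7 : d.length = 7) (hb : ∀ x ∈ d, x = 0 ∨ x = 1) :
    bch_15_7_encode d = bch_15_7_encode_alt d := by
  rcases d with _ | ⟨b0, d⟩; · simp at h7
  rcases d with _ | ⟨b1, d⟩; · simp at h7
  rcases d with _ | ⟨b2, d⟩; · simp at h7
  rcases d with _ | ⟨b3, d⟩; · simp at h7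
  rcases d with _ | ⟨b4, d⟩; · simp at h7
  rcases d with _ | ⟨b5, d⟩; · simp at h7
  rcases d with _ | ⟨b6, d⟩; · simp at h7
  rcases d with _ | ⟨b7, d⟩
  swap; · simp at h7
  rcases hb b0 (by simp) with rfl | rfl <;>
    rcases hb b1 (by simp) with rfl | rfl <;>
    rcases hb b2 (by simp) with rfl | rfl <;>
    rcases hb b3 (by simp) with rfl | rfl <;>
    rcases hb b4 (by simp) with rfl | rfl <;>
    rcases hb b5 (by simp) with rfl | rfl <;>
    rcases hb b6 (by simp) with rfl | rfl <;>
    decide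

-- ===== VERDICT (by name: the statement is the Claim_ definition above) =====
theorem bch_15_7_encode_spec : Claim_equal_bch_15_7_encode := by
  intro data7 _
  unfold Spec_bch_15_7_encode
  have hbits : ∀ x ∈ pvBits (data7.map (fun b => PySem.Int.band b 1)), x = 0 ∨ x = 1 :=
    fun x hx => mem_pvBits_bit hx
  have hlen := pvBits_length (data7.map (fun b => PySem.Int.band b 1))
  have hA : bch_15_7_encode data7
      = bch_15_7_encode (pvBits (data7.map (fun b => PySem.Int.band b 1))) := by
    simp only [bch_15_7_encode, takePad_eq_pvBits, preproc_id hlen hbits]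
  have hB : bch_15_7_encode_alt (pvBits (data7.map (fun b => PySem.Int.band b 1)))
      = bch_15_7_encode_alt data7 := by
    simp only [bch_15_7_encode_alt, slice_to_seven]
    rw [map_band_one_id hbits, List.take_of_length_le (le_of_eq hlen), hlen]
    simp only [Nat.sub_self, List.replicate_zero, List.append_nil, pvBits]
  rw [hA, ← hB]
  exact key _ hlen hbits
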